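-- pv_equiv track=rewrite | github.com/fbientrigo/radiationXlabs_notebooks | tests/test_cpld_decode.py | _expected_events
-- ===== SOURCE A (Python) =====
-- from typing import Dict, Iterable, List, Sequence
--
-- def _expected_cumulative_counts(
--     sequence: Sequence[Sequence[int]], n_bits: int = 16
-- ) -> List[List[int]]:
--     """Return per-row cumulative counts for each bit in ``sequence``."""
--
--     history = [[0] * len(sequence) for _ in range(n_bits)]
--     prev_state = [0] * n_bits
--     totals = [0] * n_bits
--
--     for row_index, active_bits in enumerate(sequence):
--         current_state = [0] * n_bits
--         for bit in active_bits:
--             current_state[bit] = 1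
--         for bit in range(n_bits):
--             if prev_state[bit] == 0 and current_state[bit] == 1:
--                 totals[bit] += 1
--             history[bit][row_index] = totals[bit]
--             prev_state[bit] = current_state[bit]
--     return history
--
-- def _expected_events(
--     sequence: Sequence[Sequence[int]], n_bits: int = 16
-- ) -> List[tuple[int, int, int]]:
--     """Return the row index and increment for each detected bit transition."""
--
--     counts = _expected_cumulative_counts(sequence, n_bits)
--     events: List[tuple[int, int, int]] = []
--
--     for bit in range(n_bits):
--         prev = 0
--         for row_index, value in enumerate(counts[bit]):
--             diff = value - prev
--             if diff > 0:
--                 events.append((bit, row_index, diff))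
--             prev = value
--
--     events.sort(key=lambda entry: (entry[1], entry[0]))
--     return events
-- ===== SOURCE B (Python) =====
-- from typing import List, Sequence
--
--
-- def _expected_events(
--     sequence: Sequence[Sequence[int]], n_bits: int = 16
-- ) -> List[tuple[int, int, int]]:
--     """Single pass over the rows: emit (bit, row, 1) at each rising edge.
--
--     Row-outer / bit-inner iteration already yields the (row, bit) order, and a
--     rising edge always increments the cumulative count by exactly 1, so no
--     cumulative-count table and no final sort are needed.
--     """
--
--     events: List[tuple[int, int, int]] = []
--     prev_state = [0] * n_bits
--     for row_index, active_bits in enumerate(sequence):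
--         current_state = [0] * n_bits
--         for bit in active_bits:
--             current_state[bit] = 1
--         for bit, (p, c) in enumerate(zip(prev_state, current_state)):
--             if p == 0 and c == 1:
--                 events.append((bit, row_index, 1))
--         prev_state = current_state
--     return events
-- ===== Notes on version B (the rewrite author's own statement) =====
-- stated objective: simpler
-- what changed: Replaced the two-phase pipeline (build an n_bits x len(sequence) cumulative-count matrix, then re-scan it per bit for positive diffs and sort the events by (row, bit)) with a single row-major pass that keeps only the previous bit state and appends (bit, row, 1) at each rising edge, which is already in (row, bit) order so the matrix, the diff scan and the sort disappear.
import Mathlib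
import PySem

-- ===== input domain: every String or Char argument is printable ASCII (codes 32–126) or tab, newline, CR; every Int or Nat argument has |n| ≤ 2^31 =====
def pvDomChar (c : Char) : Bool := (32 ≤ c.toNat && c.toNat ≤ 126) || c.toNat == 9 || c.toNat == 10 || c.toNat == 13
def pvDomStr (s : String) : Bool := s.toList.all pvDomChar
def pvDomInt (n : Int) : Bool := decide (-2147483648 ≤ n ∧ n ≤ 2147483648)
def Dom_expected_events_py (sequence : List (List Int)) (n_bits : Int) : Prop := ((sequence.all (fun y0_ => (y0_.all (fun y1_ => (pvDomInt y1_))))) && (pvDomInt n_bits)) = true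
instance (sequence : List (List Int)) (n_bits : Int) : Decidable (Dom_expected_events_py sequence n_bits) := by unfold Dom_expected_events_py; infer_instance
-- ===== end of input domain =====

-- ===== PORT A =====
-- current_state = [0]*n_bits; for bit in active_bits: current_state[bit] = 1
def pyA_current (n_bits : Int) (row : List Int) : List Int :=
  row.foldl (fun c b => PySem.List.pySetD c b 1) (List.replicate n_bits.toNat 0)

-- one row of A's loop; 'for bit in range(n_bits)' reads/writes position bit of
-- prev_state/current_state/totals/history, which all have length n_bits, so it is
-- ported as pointwise zipWith updates over those same lists (same order, same values)
def pyA_row (n_bits : Int) (st : List (List Int) × List Int × List Int) (rp : Int × List Int) :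
    List (List Int) × List Int × List Int :=
  let current_state := pyA_current n_bits rp.2
  let totals' := List.zipWith (fun pt c => if pt.1 = 0 ∧ c = 1 then pt.2 + 1 else pt.2)
      (st.2.1.zip st.2.2) current_state
  let history' := List.zipWith (fun h t => PySem.List.pySetD h rp.1 t) st.1 totals'
  (history', current_state, totals')

-- port of _expected_cumulative_counts (helper of A)
def expected_cumulative_counts_py (sequence : List (List Int)) (n_bits : Int) : List (List Int) :=
  ((PySem.List.enumerate sequence 0).foldl (pyA_row n_bits)
    ((PySem.List.pyRange 0 n_bits 1).map (fun _ => List.replicate sequence.length (0 : Int)),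
     List.replicate n_bits.toNat (0 : Int), List.replicate n_bits.toNat (0 : Int))).1

-- 'for bit in range(n_bits): ... counts[bit]' ported as zipping range(n_bits) with
-- counts, exact because len(counts) == n_bits by construction
def expected_events_py (sequence : List (List Int)) (n_bits : Int) : List (Int × Int × Int) :=
  let counts := expected_cumulative_counts_py sequence n_bits
  let events := ((PySem.List.pyRange 0 n_bits 1).zip counts).foldl
    (fun ev bc =>
      ((PySem.List.enumerate bc.2 0).foldl
        (fun (st : List (Int × Int × Int) × Int) rv =>
          let diff := rv.2 - st.2
          (if diff > 0 then st.1 ++ [(bc.1, rv.1, diff)] else st.1, rv.2))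
        (ev, 0)).1)
    []
  PySem.List.sorted2 events (fun e => e.2.1) (fun e => e.1)

-- ===== PORT B =====
def pyB_current (n_bits : Int) (row : List Int) : List Int :=
  row.foldl (fun c b => PySem.List.pySetD c b 1) (List.replicate n_bits.toNat 0)

-- one row of B's loop; 'for bit, (p, c) in enumerate(zip(prev_state, current_state))'
-- is ported as zipping range(n_bits) with the zipped states (both have length n_bits)
def pyB_row (n_bits : Int) (st : List (Int × Int × Int) × List Int) (rp : Int × List Int) :
    List (Int × Int × Int) × List Int :=
  let current_state := pyB_current n_bits rp.2
  let events := ((PySem.List.pyRange 0 n_bits 1).zip (st.2.zip current_state)).foldl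
    (fun ev bpc => if bpc.2.1 = 0 ∧ bpc.2.2 = 1 then ev ++ [(bpc.1, rp.1, 1)] else ev) st.1
  (events, current_state)

def expected_events_py_alt (sequence : List (List Int)) (n_bits : Int) : List (Int × Int × Int) :=
  ((PySem.List.enumerate sequence 0).foldl (pyB_row n_bits)
    ([], List.replicate n_bits.toNat (0 : Int))).1

-- ===== PRECONDITION & SPEC =====
-- Pre_: every listed bit is a valid Python index into a length-n_bits list
-- (outside this, A raises IndexError on current_state[bit] = 1).
def Pre_expected_events_py (sequence : List (List Int)) (n_bits : Int) : Prop :=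
  ∀ row ∈ sequence, ∀ b ∈ row, PySem.Raise.InRange n_bits.toNat b
instance (sequence : List (List Int)) (n_bits : Int) : Decidable (Pre_expected_events_py sequence n_bits) := by
  unfold Pre_expected_events_py; unfold PySem.Raise.InRange; infer_instance
def pvWitness_expected_events_py : List (List Int) × Int := ([[1], [1, 3], [], [0, 3]], 4)

def Spec_expected_events_py (sequence : List (List Int)) (n_bits : Int) (out : List (Int × Int × Int)) : Prop := out = expected_events_py_alt sequence n_bits
instance (sequence : List (List Int)) (n_bits : Int) (out : List (Int × Int × Int)) : Decidable (Spec_expected_events_py sequence n_bits out) := by unfold Spec_expected_events_py; infer_instance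

-- ===== CLAIM (what is proved, stated in full; the proofs are below) =====
def Claim_equal_expected_events_py : Prop := ∀ (sequence : List (List Int)) (n_bits : Int), Dom_expected_events_py sequence n_bits → Pre_expected_events_py sequence n_bits → Spec_expected_events_py sequence n_bits (expected_events_py sequence n_bits)

-- ===== LEMMAS AND PROOFS =====

-- the bit-state list a row produces (current_state in both Pythons)
def pvState (n_bits : Int) (row : List Int) : List Int :=
  row.foldl (fun c b => PySem.List.pySetD c b 1) (List.replicate n_bits.toNat 0)

-- new totals entry for bit i after one row (A's inner-loop update)
def pvNewT (cur P T : List Int) (i : Nat) : Int :=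
  if P.getD i 0 = 0 ∧ cur.getD i 0 = 1 then T.getD i 0 + 1 else T.getD i 0

-- write a block of values at consecutive indices (A's history[bit][row] updates)
def pvWrite (l : List Int) (r : Int) : List Int → List Int
  | [] => l
  | v :: vs => pvWrite (PySem.List.pySetD l r v) (r + 1) vs

-- reference cumulative-count column for bit i
def pvCum (n_bits : Int) (i : Nat) (prev : List Int) (t : Int) : List (List Int) → List Int
  | [] => []
  | row :: rest =>
    let c := pvState n_bits row
    let t' := if prev.getD i 0 = 0 ∧ c.getD i 0 = 1 then t + 1 else t
    t' :: pvCum n_bits i c t' rest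

-- rows at which bit i rises
def pvRises (n_bits : Int) (i : Nat) (prev : List Int) (r0 : Int) : List (List Int) → List Int
  | [] => []
  | row :: rest =>
    let c := pvState n_bits row
    (if prev.getD i 0 = 0 ∧ c.getD i 0 = 1 then [r0] else []) ++ pvRises n_bits i c (r0 + 1) rest

-- events one row emits (B's inner loop)
def pvRowEv (n_bits : Int) (prev c : List Int) (r0 : Int) : List (Int × Int × Int) :=
  ((List.range n_bits.toNat).filter
      (fun i => decide (prev.getD i 0 = 0 ∧ c.getD i 0 = 1))).map (fun (i : Nat) => ((i : Int), r0, 1))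

-- events of all rows, row-major (B's result)
def pvRowsEv (n_bits : Int) (prev : List Int) (r0 : Int) : List (List Int) → List (Int × Int × Int)
  | [] => []
  | row :: rest =>
    pvRowEv n_bits prev (pvState n_bits row) r0 ++ pvRowsEv n_bits (pvState n_bits row) (r0 + 1) rest

lemma pvRange (m : Int) : PySem.List.pyRange 0 m 1 = (List.range m.toNat).map (fun (i : Nat) => (i : Int)) := by
  rcases le_or_gt m 0 with h | h
  · have h0 : m.toNat = 0 := Int.toNat_of_nonpos h
    simp [PySem.List.pyRange, h0, not_lt.mpr h]
  · have := PySem.List.pyRange_zero_natCast m.toNat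
    rwa [Int.toNat_of_nonneg h.le] at this

lemma pvSetFold_length (l : List Int) : ∀ (c : List Int),
    (l.foldl (fun c b => PySem.List.pySetD c b 1) c).length = c.length := by
  induction l with
  | nil => intro c; rfl
  | cons b t ih => intro c; simp [List.foldl_cons, ih, PySem.List.length_pySetD]

lemma pvState_length (n_bits : Int) (row : List Int) : (pvState n_bits row).length = n_bits.toNat := by
  simp [pvState, pvSetFold_length]

lemma pvA_unfold (sequence : List (List Int)) (n_bits : Int) :
    expected_cumulative_counts_py sequence n_bits =
    ((PySem.List.enumerate sequence 0).foldl (pyA_row n_bits)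
      ((PySem.List.pyRange 0 n_bits 1).map (fun _ => List.replicate sequence.length (0 : Int)),
       List.replicate n_bits.toNat (0 : Int), List.replicate n_bits.toNat (0 : Int))).1 := rfl

lemma pvA_outer (n_bits : Int) :
    ∀ (rows : List (List Int)) (r0 : Int) (H : List (List Int)) (P T : List Int),
      H.length = n_bits.toNat → P.length = n_bits.toNat → T.length = n_bits.toNat →
      (((PySem.List.enumerate rows r0).foldl (pyA_row n_bits) (H, P, T)).1.length = n_bits.toNat) ∧
      (∀ i : Nat, i < n_bits.toNat →
        ((PySem.List.enumerate rows r0).foldl (pyA_row n_bits) (H, P, T)).1.getD i []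
          = pvWrite (H.getD i []) r0 (pvCum n_bits i P (T.getD i 0) rows)) := by
  intro rows
  induction rows with
  | nil =>
    intro r0 H P T hH _ _
    exact ⟨hH, fun i _ => rfl⟩
  | cons row rest ihr =>
    intro r0 H P T hH hP hT
    rw [show PySem.List.enumerate (row :: rest) r0
          = (r0, row) :: PySem.List.enumerate rest (r0 + 1) from rfl,
        List.foldl_cons,
        show pyA_row n_bits (H, P, T) (r0, row)
          = (List.zipWith (fun h t => PySem.List.pySetD h r0 t) H
              (List.zipWith (fun pt c => if pt.1 = 0 ∧ c = 1 then pt.2 + 1 else pt.2)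
                (P.zip T) (pvState n_bits row)),
             pvState n_bits row,
             List.zipWith (fun pt c => if pt.1 = 0 ∧ c = 1 then pt.2 + 1 else pt.2)
               (P.zip T) (pvState n_bits row)) from rfl]
    have hcl : (pvState n_bits row).length = n_bits.toNat := pvState_length n_bits row
    set cur := pvState n_bits row with hcur
    set T1 := List.zipWith (fun pt c => if pt.1 = 0 ∧ c = 1 then pt.2 + 1 else pt.2)
      (P.zip T) cur with hT1
    set H1 := List.zipWith (fun h t => PySem.List.pySetD h r0 t) H T1 with hH1
    have hTlen : T1.length = n_bits.toNat := by
      simp [hT1, List.length_zipWith, List.length_zip, hP, hT, hcl]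
    have hHlen : H1.length = n_bits.toNat := by
      simp [hH1, List.length_zipWith, hH, hTlen]
    have hTget : ∀ i : Nat, i < n_bits.toNat → T1.getD i 0 = pvNewT cur P T i := by
      intro i hi
      rw [List.getD_eq_getElem _ _ (by rw [hTlen]; exact hi)]
      simp only [hT1, List.getElem_zipWith, List.getElem_zip]
      simp only [pvNewT]
      rw [List.getD_eq_getElem P _ (by rw [hP]; exact hi),
          List.getD_eq_getElem T _ (by rw [hT]; exact hi),
          List.getD_eq_getElem cur _ (by rw [hcl]; exact hi)]
    have hHget : ∀ i : Nat, i < n_bits.toNat →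
        H1.getD i [] = PySem.List.pySetD (H.getD i []) r0 (pvNewT cur P T i) := by
      intro i hi
      have ht := hTget i hi
      rw [List.getD_eq_getElem _ _ (by rw [hTlen]; exact hi)] at ht
      rw [List.getD_eq_getElem _ _ (by rw [hHlen]; exact hi)]
      simp only [hH1, List.getElem_zipWith]
      rw [ht, List.getD_eq_getElem H _ (by rw [hH]; exact hi)]
    obtain ⟨out1, out2⟩ := ihr (r0 + 1) H1 cur T1 hHlen hcl hTlen
    refine ⟨out1, ?_⟩
    intro i hi
    rw [out2 i hi, hHget i hi, hTget i hi]
    simp only [pvCum, pvWrite, pvNewT, hcur]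

lemma pvCum_length (n_bits : Int) (i : Nat) :
    ∀ (rows : List (List Int)) (prev : List Int) (t : Int),
      (pvCum n_bits i prev t rows).length = rows.length := by
  intro rows
  induction rows with
  | nil => intro prev t; rfl
  | cons row rest ih => intro prev t; simp [pvCum, ih]

lemma pvWrite_append : ∀ (vs old pre : List Int), old.length = vs.length →
    pvWrite (pre ++ old) (pre.length : Int) vs = pre ++ vs := by
  intro vs
  induction vs with
  | nil =>
    intro old pre h
    have hnil : old = [] := List.eq_nil_of_length_eq_zero (by simpa using h)
    simp [pvWrite, hnil]
  | cons v vs ih =>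
    intro old pre h
    cases old with
    | nil => simp at h
    | cons o os =>
      show pvWrite (PySem.List.pySetD (pre ++ o :: os) (pre.length : Int) v) ((pre.length : Int) + 1) vs = _
      rw [PySem.List.pySetD_natCast]
      have hset : (pre ++ o :: os).set pre.length v = (pre ++ [v]) ++ os := by
        simp
      have hlen : ((pre.length : Int) + 1) = (((pre ++ [v]).length : Nat) : Int) := by
        simp
      rw [hset, hlen, ih os (pre ++ [v]) (by simpa using h)]
      simp

lemma pvCounts_length (sequence : List (List Int)) (n_bits : Int) :
    (expected_cumulative_counts_py sequence n_bits).length = n_bits.toNat := by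
  rw [pvA_unfold]
  exact (pvA_outer n_bits sequence 0 _ _ _
    (by rw [pvRange]; simp) (by simp) (by simp)).1

lemma pvCounts_getD (sequence : List (List Int)) (n_bits : Int) (i : Nat) (hi : i < n_bits.toNat) :
    (expected_cumulative_counts_py sequence n_bits).getD i []
      = pvCum n_bits i (List.replicate n_bits.toNat 0) 0 sequence := by
  rw [pvA_unfold]
  have h := (pvA_outer n_bits sequence 0
    ((PySem.List.pyRange 0 n_bits 1).map (fun _ => List.replicate sequence.length (0 : Int)))
    (List.replicate n_bits.toNat 0) (List.replicate n_bits.toNat 0)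
    (by rw [pvRange]; simp) (by simp) (by simp)).2 i hi
  rw [h]
  have hT0 : (List.replicate n_bits.toNat (0 : Int)).getD i 0 = 0 := by
    rw [List.getD_eq_getElem _ _ (by simpa using hi)]; simp
  have hH0 : ((PySem.List.pyRange 0 n_bits 1).map
      (fun _ => List.replicate sequence.length (0 : Int))).getD i []
      = List.replicate sequence.length (0 : Int) := by
    rw [pvRange, List.map_map,
      List.getD_eq_getElem _ _ (by simpa using hi)]
    simp
  rw [hH0, hT0]
  have hlen : (List.replicate sequence.length (0 : Int)).length
      = (pvCum n_bits i (List.replicate n_bits.toNat 0) 0 sequence).length := by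
    rw [pvCum_length]; simp
  have hw := pvWrite_append (pvCum n_bits i (List.replicate n_bits.toNat 0) 0 sequence)
    (List.replicate sequence.length (0 : Int)) [] hlen
  simpa using hw

lemma pvA_scan (n_bits : Int) (i : Nat) :
    ∀ (rows : List (List Int)) (prev : List Int) (t r0 : Int) (acc : List (Int × Int × Int)),
      ((PySem.List.enumerate (pvCum n_bits i prev t rows) r0).foldl
        (fun (st : List (Int × Int × Int) × Int) rv =>
          (if rv.2 - st.2 > 0 then st.1 ++ [((i : Int), rv.1, rv.2 - st.2)] else st.1, rv.2))
        (acc, t)).1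
      = acc ++ (pvRises n_bits i prev r0 rows).map (fun r => ((i : Int), r, 1)) := by
  intro rows
  induction rows with
  | nil => intro prev t r0 acc; simp [pvCum, pvRises]
  | cons row rest ih =>
    intro prev t r0 acc
    by_cases hc : prev.getD i 0 = 0 ∧ (pvState n_bits row).getD i 0 = 1
    · have h1 : (t + 1 - t : Int) = 1 := by omega
      have hgt : (t + 1 - t : Int) > 0 := by omega
      simp only [pvCum, pvRises, if_pos hc, PySem.List.enumerate, List.foldl_cons]
      rw [if_pos hgt, h1, ih (pvState n_bits row) (t + 1) (r0 + 1) (acc ++ [((i : Int), r0, 1)])]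
      simp
    · have h0 : ¬ ((t - t : Int) > 0) := by omega
      simp only [pvCum, pvRises, if_neg hc, PySem.List.enumerate, List.foldl_cons]
      rw [if_neg h0, ih (pvState n_bits row) t (r0 + 1) acc]
      simp

lemma pvA_events (sequence : List (List Int)) (n_bits : Int) :
    expected_events_py sequence n_bits
      = PySem.List.sorted2
          ((List.range n_bits.toNat).flatMap
            (fun i => (pvRises n_bits i (List.replicate n_bits.toNat 0) 0 sequence).map
              (fun r => ((i : Int), r, 1))))
          (fun e => e.2.1) (fun e => e.1) := by
  have h0 : expected_events_py sequence n_bits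
      = PySem.List.sorted2
          (((PySem.List.pyRange 0 n_bits 1).zip (expected_cumulative_counts_py sequence n_bits)).foldl
            (fun ev bc =>
              ((PySem.List.enumerate bc.2 0).foldl
                (fun (st : List (Int × Int × Int) × Int) rv =>
                  (if rv.2 - st.2 > 0 then st.1 ++ [(bc.1, rv.1, rv.2 - st.2)] else st.1, rv.2))
                (ev, 0)).1)
            [])
          (fun e => e.2.1) (fun e => e.1) := rfl
  have hzip : (PySem.List.pyRange 0 n_bits 1).zip (expected_cumulative_counts_py sequence n_bits)
      = (List.range n_bits.toNat).map (fun (i : Nat) =>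
          ((i : Int), pvCum n_bits i (List.replicate n_bits.toNat 0) 0 sequence)) := by
    rw [pvRange]
    refine List.ext_getElem ?_ ?_
    · simp [List.length_zip, pvCounts_length]
    · intro i h1 h2
      have hi : i < n_bits.toNat := by simpa using h2
      simp only [List.getElem_zip, List.getElem_map, List.getElem_range, Prod.mk.injEq]
      refine ⟨trivial, ?_⟩
      rw [← List.getD_eq_getElem _ [] (by rw [pvCounts_length]; exact hi)]
      exact pvCounts_getD sequence n_bits i hi
  rw [h0, hzip, List.foldl_map]
  congr 1
  rw [PySem.List.foldl_congr_mem (List.range n_bits.toNat) _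
    (fun acc (i : Nat) => acc ++ (pvRises n_bits i (List.replicate n_bits.toNat 0) 0 sequence).map
      (fun (r : Int) => ((i : Int), r, (1 : Int)))) []
    (fun acc i _ => pvA_scan n_bits i sequence (List.replicate n_bits.toNat 0) 0 0 acc),
    PySem.List.foldl_append_eq_flatMap]
  simp

lemma pvB_inner (n_bits r0 : Int) (prev cur : List Int) (acc : List (Int × Int × Int))
    (hprev : prev.length = n_bits.toNat) (hcur : cur.length = n_bits.toNat) :
    ((PySem.List.pyRange 0 n_bits 1).zip (prev.zip cur)).foldl
      (fun ev bpc => if bpc.2.1 = 0 ∧ bpc.2.2 = 1 then ev ++ [(bpc.1, r0, 1)] else ev) acc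
    = acc ++ pvRowEv n_bits prev cur r0 := by
  have hzip2 : (PySem.List.pyRange 0 n_bits 1).zip (prev.zip cur)
      = (List.range n_bits.toNat).map (fun (i : Nat) =>
          ((i : Int), prev.getD i 0, cur.getD i 0)) := by
    rw [pvRange]
    refine List.ext_getElem ?_ ?_
    · simp [List.length_zip, hprev, hcur]
    · intro i h1 h2
      have hi : i < n_bits.toNat := by simpa using h2
      simp only [List.getElem_zip, List.getElem_map, List.getElem_range, Prod.mk.injEq]
      refine ⟨trivial, ?_, ?_⟩
      · rw [List.getD_eq_getElem prev _ (by rw [hprev]; exact hi)]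
      · rw [List.getD_eq_getElem cur _ (by rw [hcur]; exact hi)]
  rw [hzip2, List.foldl_map,
      PySem.List.foldl_congr_mem (List.range n_bits.toNat) _
        (fun ev (i : Nat) => if prev.getD i 0 = 0 ∧ cur.getD i 0 = 1
          then ev ++ [((i : Int), r0, (1 : Int))] else ev) acc
        (fun acc' i _ => rfl),
      PySem.List.foldl_append_ite (fun i => prev.getD i 0 = 0 ∧ cur.getD i 0 = 1)
        (fun (i : Nat) => ((i : Int), r0, (1 : Int))) (List.range n_bits.toNat) acc]
  simp [pvRowEv]

lemma pvB_rows (n_bits : Int) :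
    ∀ (rows : List (List Int)) (r0 : Int) (prev : List Int) (acc : List (Int × Int × Int)),
      prev.length = n_bits.toNat →
      ((PySem.List.enumerate rows r0).foldl (pyB_row n_bits) (acc, prev)).1
      = acc ++ pvRowsEv n_bits prev r0 rows := by
  intro rows
  induction rows with
  | nil => intro r0 prev acc _; simp [PySem.List.enumerate, pvRowsEv]
  | cons row rest ih =>
    intro r0 prev acc hprev
    rw [show PySem.List.enumerate (row :: rest) r0
          = (r0, row) :: PySem.List.enumerate rest (r0 + 1) from rfl,
        List.foldl_cons,
        show pyB_row n_bits (acc, prev) (r0, row)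
          = (((PySem.List.pyRange 0 n_bits 1).zip (prev.zip (pvState n_bits row))).foldl
              (fun ev bpc => if bpc.2.1 = 0 ∧ bpc.2.2 = 1 then ev ++ [(bpc.1, r0, 1)] else ev) acc,
             pvState n_bits row) from rfl,
        pvB_inner n_bits r0 prev (pvState n_bits row) acc hprev (pvState_length n_bits row),
        ih (r0 + 1) (pvState n_bits row) (acc ++ pvRowEv n_bits prev (pvState n_bits row) r0)
          (pvState_length n_bits row)]
    simp [pvRowsEv]

lemma pvB_eq (sequence : List (List Int)) (n_bits : Int) :
    expected_events_py_alt sequence n_bits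
      = pvRowsEv n_bits (List.replicate n_bits.toNat 0) 0 sequence := by
  have h : expected_events_py_alt sequence n_bits
      = ((PySem.List.enumerate sequence 0).foldl (pyB_row n_bits)
          ([], List.replicate n_bits.toNat 0)).1 := rfl
  rw [h, pvB_rows n_bits sequence 0 (List.replicate n_bits.toNat 0) [] (by simp)]
  simp

lemma pvFlatMap_append_perm {α β : Type} (l : List α) (g h : α → List β) :
    (l.flatMap (fun x => g x ++ h x)).Perm (l.flatMap g ++ l.flatMap h) := by
  induction l with
  | nil => simp
  | cons a t ih =>
    simp only [List.flatMap_cons]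
    refine ((ih.append_left _).trans ?_)
    have h1 : (h a ++ (t.flatMap g ++ t.flatMap h)).Perm (t.flatMap g ++ (h a ++ t.flatMap h)) :=
      List.perm_append_comm_assoc _ _ _
    have h2 := h1.append_left (g a)
    simpa [List.append_assoc] using h2

lemma pvFlatMap_ite_singleton {α β : Type} (l : List α) (p : α → Prop) [DecidablePred p] (f : α → β) :
    l.flatMap (fun i => if p i then [f i] else []) = (l.filter (fun i => decide (p i))).map f := by
  induction l with
  | nil => rfl
  | cons a t ih =>
    by_cases h : p a <;> simp [List.flatMap_cons, h, ih]

lemma pvPerm_main (n_bits : Int) :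
    ∀ (rows : List (List Int)) (prev : List Int) (r0 : Int),
      ((List.range n_bits.toNat).flatMap
        (fun i => (pvRises n_bits i prev r0 rows).map (fun r => ((i : Int), r, 1)))).Perm
        (pvRowsEv n_bits prev r0 rows) := by
  intro rows
  induction rows with
  | nil => intro prev r0; simp [pvRises, pvRowsEv]
  | cons row rest ih =>
    intro prev r0
    simp only [pvRises, pvRowsEv, List.map_append]
    refine (pvFlatMap_append_perm _ _ _).trans ?_
    refine List.Perm.append ?_ (ih (pvState n_bits row) (r0 + 1))
    have h1 : ∀ i : Nat,
        ((if (prev.getD i 0 = 0 ∧ (pvState n_bits row).getD i 0 = 1) then [r0] else []).map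
          (fun (r : Int) => ((i : Int), r, (1 : Int))))
        = (if (prev.getD i 0 = 0 ∧ (pvState n_bits row).getD i 0 = 1)
           then [((i : Int), r0, (1 : Int))] else []) := by
      intro i; split_ifs <;> simp
    refine List.Perm.of_eq ((List.flatMap_congr (fun i _ => h1 i)).trans ?_)
    refine (pvFlatMap_ite_singleton (List.range n_bits.toNat)
      (fun i => (prev.getD i 0 = 0 ∧ (pvState n_bits row).getD i 0 = 1))
      (fun (i : Nat) => ((i : Int), r0, 1))).trans ?_
    simp only [pvRowEv]

lemma pvRowsEv_row_lb (n_bits : Int) :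
    ∀ (rows : List (List Int)) (prev : List Int) (r0 : Int) (e : Int × Int × Int),
      e ∈ pvRowsEv n_bits prev r0 rows → r0 ≤ e.2.1 := by
  intro rows
  induction rows with
  | nil => intro prev r0 e he; simp [pvRowsEv] at he
  | cons row rest ih =>
    intro prev r0 e he
    simp only [pvRowsEv] at he
    rcases List.mem_append.mp he with h | h
    · rcases List.mem_map.mp h with ⟨i, _, rfl⟩; simp
    · have := ih (pvState n_bits row) (r0 + 1) e h; omega

lemma pvRowsEv_pairwise (n_bits : Int) :
    ∀ (rows : List (List Int)) (prev : List Int) (r0 : Int),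
      (pvRowsEv n_bits prev r0 rows).Pairwise
        (fun a b => (toLex (a.2.1, a.1) : Lex (Int × Int)) < toLex (b.2.1, b.1)) := by
  intro rows
  induction rows with
  | nil => intro prev r0; simp [pvRowsEv]
  | cons row rest ih =>
    intro prev r0
    simp only [pvRowsEv]
    rw [List.pairwise_append]
    refine ⟨?_, ih (pvState n_bits row) (r0 + 1), ?_⟩
    · simp only [pvRowEv]
      rw [List.pairwise_map]
      refine List.Pairwise.imp ?_
        ((List.pairwise_lt_range).sublist (List.filter_sublist))
      intro i j hij
      rw [Prod.Lex.lt_iff]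
      right
      refine ⟨rfl, ?_⟩
      simp only [ofLex_toLex]
      exact_mod_cast hij
    · intro a ha b hb
      rcases List.mem_map.mp ha with ⟨i, _, rfl⟩
      have hb' := pvRowsEv_row_lb n_bits rest (pvState n_bits row) (r0 + 1) b hb
      rw [Prod.Lex.lt_iff]
      left
      simp only [ofLex_toLex]
      omega

lemma pvSorted2_eq_sorted_lex (xs : List (Int × Int × Int)) :
    PySem.List.sorted2 xs (fun e => e.2.1) (fun e => e.1)
      = PySem.List.sorted xs (fun e => (toLex (e.2.1, e.1) : Lex (Int × Int))) := by
  rw [PySem.List.sorted_eq_foldl_insertBy]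
  simp only [PySem.List.sorted2]
  have hfn : (fun (a b : Int × Int × Int) =>
        (decide (a.2.1 < b.2.1) || (!decide (b.2.1 < a.2.1) && decide (a.1 < b.1))))
      = (fun (a b : Int × Int × Int) =>
        decide ((toLex (a.2.1, a.1) : Lex (Int × Int)) < toLex (b.2.1, b.1))) := by
    funext a b
    rcases lt_trichotomy a.2.1 b.2.1 with h | h | h
    · simp [Prod.Lex.lt_iff, h, asymm h]
    · simp [Prod.Lex.lt_iff, h]
    · simp [Prod.Lex.lt_iff, h, asymm h, h.ne']
  rw [hfn]
  simp

-- ===== VERDICT (by name: the statement is the Claim_ definition above) =====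
theorem expected_events_py_spec : Claim_equal_expected_events_py := by
  intro sequence n_bits _ _
  unfold Spec_expected_events_py
  rw [pvA_events, pvB_eq, pvSorted2_eq_sorted_lex]
  exact PySem.List.sorted_eq_of_perm_of_pairwise_lt _ _ _
    ((pvPerm_main n_bits sequence (List.replicate n_bits.toNat 0) 0).symm)
    (pvRowsEv_pairwise n_bits sequence (List.replicate n_bits.toNat 0) 0)
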